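-- pv_equiv track=rewrite | github.com/rexon1992/data_mining_selenium_py | Fund_data.py | scrape_info
-- ===== SOURCE A (Python) =====
-- def join_elements_country_data(indices,data_set):
--     string=''
--     for index in indices:
--         string=string+", "+data_set[index]
--     return string[2:]
--
-- def scrape_info(data_set):
--     country = data_set[0]
--     name = data_set[1]
--
--     fp_index = [i for i, x in enumerate(data_set) if 'Focal Point' in x]
--     status = join_elements_country_data(fp_index,data_set)
--
--     designation = data_set[max(fp_index) + 1]
--
--     tel_index = [i for i, x in enumerate(data_set) if 'Tel' in x]
--     telephone = data_set[tel_index[0]]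
--     try:
--         fax_index = [i for i, x in enumerate(data_set) if 'Fax' in x]
--         fax = data_set[fax_index[0]]
--     except IndexError:
--         fax = 'NA'
--     email_index = [i for i, x in enumerate(data_set) if 'Email' in x]
--     email = data_set[email_index[0]]
--     address = join_elements_country_data(range((max(fp_index) + 2), (tel_index[0])),data_set)
--     info = [country, name, status, designation, address, telephone, fax, email]
--     return(info)
-- ===== SOURCE B (Python) =====
-- def scrape_info(data_set):
--     country = data_set[0]
--     name = data_set[1]
--     fp_parts = []
--     last_fp = tel0 = fax0 = email0 = None
--     for i, x in enumerate(data_set):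
--         if 'Focal Point' in x:
--             fp_parts.append(x)
--             last_fp = i
--         if 'Tel' in x and tel0 is None:
--             tel0 = i
--         if 'Fax' in x and fax0 is None:
--             fax0 = i
--         if 'Email' in x and email0 is None:
--             email0 = i
--     status = ', '.join(fp_parts)
--     designation = data_set[last_fp + 1]
--     telephone = data_set[tel0]
--     fax = data_set[fax0] if fax0 is not None else 'NA'
--     email = data_set[email0]
--     address = ', '.join(data_set[last_fp + 2:tel0])
--     return [country, name, status, designation, address, telephone, fax, email]
-- ===== Notes on version B (the rewrite author's own statement) =====
-- stated objective: simpler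
-- what changed: Replaced A's four independent substring-scanning enumerate-comprehensions plus the hand-rolled separator-fold-then-drop join by a single pass over enumerate(data_set) maintaining scalar accumulators (fp elements, last Focal-Point index, first Tel/Fax/Email indices), then ', '.join and a list slice for the address.
import Mathlib
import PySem

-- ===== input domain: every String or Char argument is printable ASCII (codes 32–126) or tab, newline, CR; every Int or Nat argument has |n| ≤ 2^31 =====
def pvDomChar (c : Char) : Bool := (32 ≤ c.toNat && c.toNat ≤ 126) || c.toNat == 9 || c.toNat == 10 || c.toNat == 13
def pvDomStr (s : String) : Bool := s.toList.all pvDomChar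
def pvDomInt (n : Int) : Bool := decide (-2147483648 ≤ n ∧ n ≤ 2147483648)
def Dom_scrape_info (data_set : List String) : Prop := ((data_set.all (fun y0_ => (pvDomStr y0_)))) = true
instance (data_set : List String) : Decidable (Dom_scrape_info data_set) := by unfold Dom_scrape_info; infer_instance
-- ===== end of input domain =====

-- B replaces A's four independent substring-scanning comprehensions + hand-rolled separator fold by ONE pass over enumerate(data_set)
-- maintaining scalar accumulators, then str.join and a slice; objective: simpler single-pass decomposition (no speed claim).

-- ===== PORT A =====
-- join_elements_country_data: builds ", "-prefixed concatenation then drops the first two chars (string[2:]).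
-- data_set[index] is ported with pyGetD (default ""): under Pre_ every index A dereferences is in range.
def pvJoinA (indices : List Int) (ds : List String) : String :=
  let cs := indices.foldl (fun acc i => acc ++ [',', ' '] ++ (PySem.List.pyGetD ds i "").toList) ([] : List Char)
  String.ofList (PySem.List.slice cs (some 2) none)

def scrape_info (data_set : List String) : List String :=
  let country := PySem.List.pyGetD data_set 0 ""
  let name := PySem.List.pyGetD data_set 1 ""
  let fp_index := ((PySem.List.enumerate data_set 0).filter (fun p => PySem.Str.isIn "Focal Point" p.2)).map (fun p => p.1)
  let status := pvJoinA fp_index data_set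
  let maxFp := (PySem.List.max? fp_index (fun y => y)).getD 0
  let designation := PySem.List.pyGetD data_set (maxFp + 1) ""
  let tel_index := ((PySem.List.enumerate data_set 0).filter (fun p => PySem.Str.isIn "Tel" p.2)).map (fun p => p.1)
  let tel0 := PySem.List.pyGetD tel_index 0 0
  let telephone := PySem.List.pyGetD data_set tel0 ""
  let fax :=
    match PySem.List.pyGet? (((PySem.List.enumerate data_set 0).filter (fun p => PySem.Str.isIn "Fax" p.2)).map (fun p => p.1)) 0 with
    | some fi => PySem.List.pyGetD data_set fi ""
    | none => "NA"
  let email_index := ((PySem.List.enumerate data_set 0).filter (fun p => PySem.Str.isIn "Email" p.2)).map (fun p => p.1)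
  let email := PySem.List.pyGetD data_set (PySem.List.pyGetD email_index 0 0) ""
  let address := pvJoinA (PySem.List.pyRange (maxFp + 2) tel0 1) data_set
  [country, name, status, designation, address, telephone, fax, email]

-- ===== PORT B =====
-- one step of B's single pass: p = (i, x); state = (fp_parts, last_fp, tel0, fax0, email0)
def pvStepB (st : List String × Option Int × Option Int × Option Int × Option Int) (p : Int × String) :
    List String × Option Int × Option Int × Option Int × Option Int :=
  match st with
  | (fp_parts, last_fp, tel0, fax0, email0) =>
    let fp_parts := if PySem.Str.isIn "Focal Point" p.2 then fp_parts ++ [p.2] else fp_parts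
    let last_fp := if PySem.Str.isIn "Focal Point" p.2 then some p.1 else last_fp
    let tel0 := if PySem.Str.isIn "Tel" p.2 && tel0.isNone then some p.1 else tel0
    let fax0 := if PySem.Str.isIn "Fax" p.2 && fax0.isNone then some p.1 else fax0
    let email0 := if PySem.Str.isIn "Email" p.2 && email0.isNone then some p.1 else email0
    (fp_parts, last_fp, tel0, fax0, email0)

def scrape_info_alt (data_set : List String) : List String :=
  let country := PySem.List.pyGetD data_set 0 ""
  let name := PySem.List.pyGetD data_set 1 ""
  match (PySem.List.enumerate data_set 0).foldl pvStepB (([] : List String), none, none, none, none) with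
  | (fp_parts, last_fp, tel0, fax0, email0) =>
    let status := PySem.Str.join ", " fp_parts
    let designation := PySem.List.pyGetD data_set (last_fp.getD 0 + 1) ""
    let telephone := PySem.List.pyGetD data_set (tel0.getD 0) ""
    let fax :=
      match fax0 with
      | some i => PySem.List.pyGetD data_set i ""
      | none => "NA"
    let email := PySem.List.pyGetD data_set (email0.getD 0) ""
    let address := PySem.Str.join ", " (PySem.List.slice data_set (some (last_fp.getD 0 + 2)) (some (tel0.getD 0)))
    [country, name, status, designation, address, telephone, fax, email]

-- ===== PRECONDITION & SPEC =====
-- Pre_: exactly the inputs where Python A returns: at least two elements (the country and name reads raise IndexError otherwise); some element contains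
-- 'Focal Point' (else the max() call raises ValueError), 'Tel' and 'Email' (else indexing the empty match list raises IndexError); and the LAST
-- element does not contain 'Focal Point' (else the designation lookup one past it raises IndexError).
def Pre_scrape_info (data_set : List String) : Prop :=
  2 ≤ data_set.length ∧
  (data_set.any (fun x => PySem.Str.isIn "Focal Point" x)) = true ∧
  (data_set.any (fun x => PySem.Str.isIn "Tel" x)) = true ∧
  (data_set.any (fun x => PySem.Str.isIn "Email" x)) = true ∧
  (PySem.Str.isIn "Focal Point" (data_set.getLastD "")) = false
instance (data_set : List String) : Decidable (Pre_scrape_info data_set) := by unfold Pre_scrape_info; infer_instance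

def pvWitness_scrape_info : List String := ["Germany", "Dr. A", "Focal Point B", "Head", "Tel: 1", "Email: a@b"]

def Spec_scrape_info (data_set : List String) (out : List String) : Prop := out = scrape_info_alt data_set
instance (data_set : List String) (out : List String) : Decidable (Spec_scrape_info data_set out) := by unfold Spec_scrape_info; infer_instance

-- ===== CLAIM (what is proved, stated in full; the proofs are below) =====
def Claim_equal_scrape_info : Prop := ∀ (data_set : List String), Dom_scrape_info data_set → Pre_scrape_info data_set → Spec_scrape_info data_set (scrape_info data_set)

-- ===== LEMMAS AND PROOFS =====

theorem pvOrOrSome {α : Type} (t : Option α) (s : α) (h : Option α) :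
    Option.or (Option.or t (some s)) h = Option.or t (some s) := by
  cases t <;> rfl

theorem pvOrLastCons {α : Type} : ∀ (l : List α) (a : α) (o : Option α),
    Option.or (a :: l).getLast? o = Option.or l.getLast? (some a) := by
  intro l
  induction l with
  | nil => intro a o; rfl
  | cons b t ih => intro a o; rw [List.getLast?_cons_cons, ih b o, ih b (some a)]

-- B's single pass computes A's four comprehensions (elements / last index / first indices) in one traversal.
theorem pvLoopB (ds : List String) : ∀ (s : Int) (fps : List String) (lf t f e : Option Int),
    (PySem.List.enumerate ds s).foldl pvStepB (fps, lf, t, f, e) =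
      (fps ++ ((PySem.List.enumerate ds s).filter (fun p => PySem.Str.isIn "Focal Point" p.2)).map (fun p => p.2),
       Option.or ((((PySem.List.enumerate ds s).filter (fun p => PySem.Str.isIn "Focal Point" p.2)).map (fun p => p.1)).getLast?) lf,
       Option.or t ((((PySem.List.enumerate ds s).filter (fun p => PySem.Str.isIn "Tel" p.2)).map (fun p => p.1)).head?),
       Option.or f ((((PySem.List.enumerate ds s).filter (fun p => PySem.Str.isIn "Fax" p.2)).map (fun p => p.1)).head?),
       Option.or e ((((PySem.List.enumerate ds s).filter (fun p => PySem.Str.isIn "Email" p.2)).map (fun p => p.1)).head?)) := by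
  induction ds with
  | nil => intro s fps lf t f e; simp [PySem.List.enumerate_nil]
  | cons x xs ih =>
    intro s fps lf t f e
    rw [PySem.List.enumerate_cons]
    simp only [List.foldl_cons]
    rw [show pvStepB (fps, lf, t, f, e) (s, x) =
        ((if PySem.Str.isIn "Focal Point" x then fps ++ [x] else fps),
         (if PySem.Str.isIn "Focal Point" x then some s else lf),
         Option.or t (if PySem.Str.isIn "Tel" x then some s else none),
         Option.or f (if PySem.Str.isIn "Fax" x then some s else none),
         Option.or e (if PySem.Str.isIn "Email" x then some s else none)) from by
      simp only [pvStepB]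
      cases hT : PySem.Str.isIn "Tel" x <;> cases hF : PySem.Str.isIn "Fax" x <;>
        cases hE : PySem.Str.isIn "Email" x <;>
        cases t <;> cases f <;> cases e <;> rfl]
    rw [ih]
    cases hP : PySem.Str.isIn "Focal Point" x <;>
      cases hT : PySem.Str.isIn "Tel" x <;>
      cases hF : PySem.Str.isIn "Fax" x <;>
      cases hE : PySem.Str.isIn "Email" x <;>
      simp only [List.filter_cons, hP, hT, hF, hE, if_true, if_false, Bool.false_eq_true,
        Bool.true_eq_false, ite_true, ite_false, List.map_cons, List.head?_cons,
        pvOrOrSome, pvOrLastCons, Option.or_none, Option.none_or, List.append_assoc,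
        List.singleton_append, List.nil_append, Prod.mk.injEq, and_true, true_and] <;>
      simp [pvOrOrSome, pvOrLastCons]

-- max over a strictly increasing list is its last element
theorem pvFoldlMaxLast : ∀ (t : List Int) (x : Int), (x :: t).Pairwise (· < ·) →
    some (t.foldl max x) = (x :: t).getLast? := by
  intro t
  induction t with
  | nil => intro x _; rfl
  | cons y t ih =>
    intro x h
    have hxy : x < y := (List.pairwise_cons.1 h).1 y (by simp)
    have h' : (y :: t).Pairwise (· < ·) := (List.pairwise_cons.1 h).2
    simp only [List.foldl_cons, max_eq_right hxy.le]
    rw [ih y h', List.getLast?_cons_cons]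

theorem pvMaxLast (l : List Int) (h : l.Pairwise (· < ·)) :
    PySem.List.max? l (fun y => y) = l.getLast? := by
  cases l with
  | nil => rfl
  | cons x t =>
    rw [PySem.List.max?_id_cons, pvFoldlMaxLast t x h]

-- fold-with-separator then drop 2 equals Python's ", ".join
theorem pvFoldSep : ∀ (l : List String) (acc : List Char),
    l.foldl (fun a x => a ++ [',', ' '] ++ x.toList) acc =
      acc ++ (l.map (fun x => [',', ' '] ++ x.toList)).flatten := by
  intro l
  induction l with
  | nil => intro acc; simp
  | cons x t ih => intro acc; simp [ih]

theorem pvJoinFlat : ∀ (rest : List (List Char)) (x : List Char),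
    PySem.Chars.join [',', ' '] (x :: rest) = x ++ (rest.map (fun y => [',', ' '] ++ y)).flatten := by
  intro rest
  induction rest with
  | nil => intro x; simp [PySem.Chars.join_singleton]
  | cons y t ih => intro x; rw [PySem.Chars.join_cons_cons, ih y]; simp

theorem pvCoreJoin (l : List String) :
    String.ofList (PySem.List.slice ((l.map (fun x => [',', ' '] ++ x.toList)).flatten) (some 2) none) =
      PySem.Str.join ", " l := by
  have hj : (PySem.Str.join ", " l).toList = PySem.Chars.join [',', ' '] (l.map String.toList) := by
    rw [PySem.Str.toList_join, show (", " : String).toList = [',', ' '] from by decide]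
  have : PySem.List.slice ((l.map (fun x => [',', ' '] ++ x.toList)).flatten) (some 2) none =
      PySem.Chars.join [',', ' '] (l.map String.toList) := by
    rw [PySem.List.slice_from _ (by norm_num : (0:Int) ≤ 2)]
    cases l with
    | nil => rfl
    | cons x rest =>
      simp only [List.map_cons, List.flatten_cons, List.cons_append, List.nil_append]
      rw [pvJoinFlat]
      simp only [List.map_map]
      rfl
  rw [this, ← hj, String.ofList_toList]

theorem pvJoinA_eq_join (idxs : List Int) (ds : List String) :
    pvJoinA idxs ds = PySem.Str.join ", " (idxs.map (fun i => PySem.List.pyGetD ds i "")) := by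
  unfold pvJoinA
  rw [show (idxs.foldl (fun acc i => acc ++ [',', ' '] ++ (PySem.List.pyGetD ds i "").toList) ([] : List Char)) =
      ((idxs.map (fun i => PySem.List.pyGetD ds i "")).foldl (fun a x => a ++ [',', ' '] ++ x.toList) ([] : List Char)) from by
    rw [List.foldl_map]]
  rw [pvFoldSep, List.nil_append, pvCoreJoin]

-- the indices A's comprehensions produce are in range, so pyGetD returns the paired element
theorem pvGetEnum (ds : List String) (p : Int × String) (hp : p ∈ PySem.List.enumerate ds 0) :
    PySem.List.pyGetD ds p.1 "" = p.2 := by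
  rcases (PySem.List.mem_enumerate_iff ds 0 p).1 hp with ⟨k, hk, rfl⟩
  simp [PySem.List.pyGetD_natCast, List.getD_eq_getElem?_getD, List.getElem?_eq_getElem hk]

-- range-of-indices lookup equals the slice
theorem pvRangeSlice (ds : List String) (a b : Int) (ha : 0 ≤ a) (hb0 : 0 ≤ b) (hb : b ≤ ds.length) :
    (PySem.List.pyRange a b 1).map (fun i => PySem.List.pyGetD ds i "") = PySem.List.slice ds (some a) (some b) := by
  rw [PySem.List.pyRange_one, PySem.List.slice_toNat ds ha hb0, List.map_map]
  apply List.ext_getElem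
  · simp only [List.length_map, List.length_range, List.length_take, List.length_drop]
    omega
  · intro i h1 h2
    simp only [List.length_map, List.length_range] at h1
    simp only [List.getElem_map, List.getElem_range, Function.comp_apply, List.getElem_take,
      List.getElem_drop]
    rw [PySem.List.pyGetD_eq_getElem ds "" (by omega) (by omega)]
    congr 1
    omega

-- indices produced by A's comprehensions are valid positions of ds
theorem pvIdxBound (ds : List String) (pred : Int × String → Bool) (i : Int)
    (hi : i ∈ ((PySem.List.enumerate ds 0).filter pred).map (fun p => p.1)) :
    0 ≤ i ∧ i < (ds.length : Int) := by
  rcases List.mem_map.1 hi with ⟨p, hp, rfl⟩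
  rcases (PySem.List.mem_enumerate_iff ds 0 p).1 (List.mem_filter.1 hp).1 with ⟨k, hk, rfl⟩
  simp only [zero_add]
  constructor
  · exact Int.natCast_nonneg k
  · exact_mod_cast hk

theorem pvGetDZeroHead (l : List Int) : l.getD 0 0 = l.head?.getD 0 := by
  cases l <;> rfl

-- ===== VERDICT (by name: the statement is the Claim_ definition above) =====
theorem scrape_info_spec : Claim_equal_scrape_info := by
  intro ds _ _
  unfold Spec_scrape_info scrape_info scrape_info_alt
  rw [pvLoopB ds 0 [] none none none]
  simp only [Option.or_none, Option.none_or, List.nil_append]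
  set FP := (PySem.List.enumerate ds 0).filter (fun p => PySem.Str.isIn "Focal Point" p.2) with hFP
  set Lfp := FP.map (fun p => p.1) with hLfp
  set Ltel := ((PySem.List.enumerate ds 0).filter (fun p => PySem.Str.isIn "Tel" p.2)).map (fun p => p.1) with hLtel
  set Lfax := ((PySem.List.enumerate ds 0).filter (fun p => PySem.Str.isIn "Fax" p.2)).map (fun p => p.1) with hLfax
  set Lem := ((PySem.List.enumerate ds 0).filter (fun p => PySem.Str.isIn "Email" p.2)).map (fun p => p.1) with hLem
  have hpair : Lfp.Pairwise (· < ·) := by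
    rw [hLfp]
    exact List.pairwise_map.2 ((PySem.List.pairwise_lt_enumerate ds 0).filter _)
  rw [pvMaxLast Lfp hpair]
  have htel : PySem.List.pyGetD Ltel 0 0 = Ltel.head?.getD 0 := by
    rw [PySem.List.pyGetD_zero, pvGetDZeroHead]
  have hem : PySem.List.pyGetD Lem 0 0 = Lem.head?.getD 0 := by
    rw [PySem.List.pyGetD_zero, pvGetDZeroHead]
  rw [htel, hem]
  have hstatus : pvJoinA Lfp ds = PySem.Str.join ", " (FP.map (fun p => p.2)) := by
    rw [pvJoinA_eq_join, hLfp, List.map_map]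
    refine congrArg _ (List.map_congr_left ?_)
    intro p hp
    exact pvGetEnum ds p (List.mem_filter.1 hp).1
  rw [hstatus]
  have hfax : PySem.List.pyGet? Lfax 0 = Lfax.head? := by
    rw [PySem.List.pyGet?_zero]
    cases Lfax <;> rfl
  rw [hfax]
  have ha : 0 ≤ Lfp.getLast?.getD 0 + 2 := by
    cases h : Lfp.getLast? with
    | none => simp
    | some v =>
      have := (pvIdxBound ds (fun p => PySem.Str.isIn "Focal Point" p.2) v
        (by simpa [hLfp, hFP] using List.mem_of_getLast? h)).1
      simp only [Option.getD_some]
      omega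
  have hb : 0 ≤ Ltel.head?.getD 0 ∧ Ltel.head?.getD 0 ≤ (ds.length : Int) := by
    cases h : Ltel.head? with
    | none => simp
    | some v =>
      have := pvIdxBound ds (fun p => PySem.Str.isIn "Tel" p.2) v
        (by simpa [hLtel] using List.mem_of_head? h)
      simp only [Option.getD_some]
      omega
  rw [show pvJoinA (PySem.List.pyRange (Lfp.getLast?.getD 0 + 2) (Ltel.head?.getD 0) 1) ds =
      PySem.Str.join ", " (PySem.List.slice ds (some (Lfp.getLast?.getD 0 + 2)) (some (Ltel.head?.getD 0))) from by
    rw [pvJoinA_eq_join, pvRangeSlice ds _ _ ha hb.1 hb.2]]
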